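-- pv_equiv track=rewrite | github.com/tuebjensen/Line-following | app/lib_process_lines.py | _get_next_segments_indices
-- ===== SOURCE A (Python) =====
-- def _get_next_segments_indices(markers: 'list[bool]', start_from: int) -> 'tuple[int, int]':
--     segment_started = False
--     start_index = None
--     end_index = None
--     for i in range(start_from, len(markers)):
--         if segment_started is False and markers[i] is True:
--             segment_started = True
--             start_index = i
--         if segment_started and markers[i] is False:
--             segment_started = False
--             end_index = i
--             break
--     return start_index, end_index or (None if start_index is None else len(markers) - 1)
-- ===== SOURCE B (Python) =====
-- def _get_next_segments_indices(markers: 'list[bool]', start_from: int) -> 'tuple[int, int]':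
--     n = len(markers)
--     start_index = None
--     end_index = None
--     first_false_after = None
--     # walk the index range BACKWARDS; when we pass a True it becomes the current
--     # best (smallest) start, and first_false_after is the nearest False after it
--     for i in reversed(range(start_from, n)):
--         if markers[i] is False:
--             first_false_after = i
--         elif markers[i] is True:
--             start_index = i
--             end_index = first_false_after if first_false_after is not None else n - 1
--     return start_index, end_index
-- ===== Notes on version B (the rewrite author's own statement) =====
-- stated objective: alternative
-- what changed: Replaced A's forward flag-driven loop with break by a single backward traversal of the index range that maintains the nearest False seen so far and overwrites (start, end) at every True, so the final state is the first segment.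
-- intended difference: For negative start_from where the wrapped scan finds a segment whose first False lands exactly at index 0, A's `end_index or ...` treats the end index 0 as falsy and returns len(markers)-1, while B returns the actual end index 0, which is the intended first-False position. — e.g. on _get_next_segments_indices([false, true], -1): A returns (some (-1), some 1), B returns (some (-1), some 0)
import Mathlib
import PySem

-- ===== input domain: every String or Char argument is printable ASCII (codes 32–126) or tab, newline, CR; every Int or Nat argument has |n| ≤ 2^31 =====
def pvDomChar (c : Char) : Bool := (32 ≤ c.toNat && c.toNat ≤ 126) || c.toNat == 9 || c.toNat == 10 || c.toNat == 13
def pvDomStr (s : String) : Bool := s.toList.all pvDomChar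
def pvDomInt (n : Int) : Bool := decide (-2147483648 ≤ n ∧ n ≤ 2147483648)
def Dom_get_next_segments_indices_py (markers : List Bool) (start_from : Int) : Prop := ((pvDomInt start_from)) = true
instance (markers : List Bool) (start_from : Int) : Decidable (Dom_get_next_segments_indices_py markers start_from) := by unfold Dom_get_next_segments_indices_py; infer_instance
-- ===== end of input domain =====

-- B replaces A's forward flag-driven break-loop by one backward traversal of the index range
-- that keeps the nearest False seen so far and overwrites (start, end) at every True; on the
-- negative-start wraparound corner where A's `end_index or …` misfires on end index 0, B
-- returns the actual end index (see D_).

-- ===== PORT A =====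
-- the for-loop with `break`: structural recursion over the index list, state
-- (segment_started, start_index); end_index is only ever assigned at the break,
-- so it is returned directly there (none when the loop ends without breaking).
def pvALoop (markers : List Bool) : List Int → Bool → Option Int → Option Int × Option Int
  | [], _, si => (si, none)
  | i :: rest, seg, si =>
    -- markers[i]; IndexError is excluded by Pre_, where pyGetD's default is unreachable
    let m := PySem.List.pyGetD markers i false
    let seg' := if seg = false ∧ m = true then true else seg
    let si' := if seg = false ∧ m = true then some i else si
    if seg' = true ∧ m = false then (si', some i)  -- end_index = i; break
    else pvALoop markers rest seg' si'

def get_next_segments_indices_py (markers : List Bool) (start_from : Int) : Option Int × Option Int :=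
  let n : Int := markers.length
  let r := pvALoop markers (PySem.List.pyRange start_from n 1) false none
  -- `end_index or (None if start_index is None else len(markers) - 1)`:
  -- Python truthiness — an end_index of 0 is falsy and falls through to the alternative
  (r.1, match r.2 with
        | some e => if e = 0 then (if r.1 = none then none else some (n - 1)) else some e
        | none => if r.1 = none then none else some (n - 1))

-- ===== PORT B =====
-- backward loop over reversed(range(start_from, n)); state is
-- (start_index, end_index, first_false_after), updated exactly as in Source B
def get_next_segments_indices_py_alt (markers : List Bool) (start_from : Int) : Option Int × Option Int :=
  let n : Int := markers.length
  let st := ((PySem.List.pyRange start_from n 1).reverse).foldl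
    (fun (s : Option Int × Option Int × Option Int) i =>
      let m := PySem.List.pyGetD markers i false
      if m = false then (s.1, s.2.1, some i)
      else (some i, some ((s.2.2).getD (n - 1)), s.2.2))
    (none, none, none)
  (st.1, st.2.1)

-- ===== PRECONDITION & SPEC =====
-- Pre_ excludes exactly the inputs on which A raises IndexError:
-- start_from < -len(markers) makes the very first markers[i] lookup go out of range.
def Pre_get_next_segments_indices_py (markers : List Bool) (start_from : Int) : Prop :=
  -(markers.length : Int) ≤ start_from
instance (markers : List Bool) (start_from : Int) : Decidable (Pre_get_next_segments_indices_py markers start_from) := by unfold Pre_get_next_segments_indices_py; infer_instance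

def pvWitness_get_next_segments_indices_py : List Bool × Int := ([true, false], 0)

-- For negative start_from where the wrapped scan finds a segment whose first False lands exactly
-- at index 0, A's `end_index or ...` treats the end index 0 as falsy and returns len(markers)-1,
-- while B returns the actual end index 0, which is the intended first-False position.
def D_get_next_segments_indices_py (markers : List Bool) (start_from : Int) : Prop :=
  markers.headD true = false ∧
  (markers.drop (markers.length + start_from).toNat).IsChain (· ≤ ·) ∧
  (markers.drop (markers.length + start_from).toNat).getLast? = some true
instance (markers : List Bool) (start_from : Int) : Decidable (D_get_next_segments_indices_py markers start_from) := by unfold D_get_next_segments_indices_py; infer_instance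

def Spec_get_next_segments_indices_py (markers : List Bool) (start_from : Int) (out : Option Int × Option Int) : Prop := ¬ D_get_next_segments_indices_py markers start_from → out = get_next_segments_indices_py_alt markers start_from
instance (markers : List Bool) (start_from : Int) (out : Option Int × Option Int) : Decidable (Spec_get_next_segments_indices_py markers start_from out) := by unfold Spec_get_next_segments_indices_py; infer_instance

def pvDiffWitness_get_next_segments_indices_py : List Bool × Int := ([false, true], -1)
def pvDiffWitnessOut_get_next_segments_indices_py : (Option Int × Option Int) × (Option Int × Option Int) :=
  ((some (-1), some 1), (some (-1), some 0))

-- ===== CLAIM (what is proved, stated in full; the proofs are below) =====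
def Claim_unchanged_get_next_segments_indices_py : Prop := ∀ (markers : List Bool) (start_from : Int), Dom_get_next_segments_indices_py markers start_from → Pre_get_next_segments_indices_py markers start_from → Spec_get_next_segments_indices_py markers start_from (get_next_segments_indices_py markers start_from)
def Claim_changed_get_next_segments_indices_py : Prop := Dom_get_next_segments_indices_py (pvDiffWitness_get_next_segments_indices_py.1) (pvDiffWitness_get_next_segments_indices_py.2) ∧ Pre_get_next_segments_indices_py (pvDiffWitness_get_next_segments_indices_py.1) (pvDiffWitness_get_next_segments_indices_py.2) ∧ D_get_next_segments_indices_py (pvDiffWitness_get_next_segments_indices_py.1) (pvDiffWitness_get_next_segments_indices_py.2) ∧ get_next_segments_indices_py (pvDiffWitness_get_next_segments_indices_py.1) (pvDiffWitness_get_next_segments_indices_py.2) = pvDiffWitnessOut_get_next_segments_indices_py.1 ∧ get_next_segments_indices_py_alt (pvDiffWitness_get_next_segments_indices_py.1) (pvDiffWitness_get_next_segments_indices_py.2) = pvDiffWitnessOut_get_next_segments_indices_py.2 ∧ pvDiffWitnessOut_get_next_segments_indices_py.1 ≠ pvDiffWitnessOut_get_next_segments_indices_py.2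
def Claim_exact_get_next_segments_indices_py : Prop := ∀ (markers : List Bool) (start_from : Int), Dom_get_next_segments_indices_py markers start_from → Pre_get_next_segments_indices_py markers start_from → D_get_next_segments_indices_py markers start_from → get_next_segments_indices_py markers start_from ≠ get_next_segments_indices_py_alt markers start_from

-- ===== LEMMAS AND PROOFS =====

-- find? over a consecutive integer range: some-characterisation (first match)
theorem pvFind_some_iff (p : Int → Bool) (b : Int) : ∀ (k : Nat) (a c : Int), (b - a).toNat ≤ k →
    ((PySem.List.pyRange a b 1).find? p = some c ↔
      (a ≤ c ∧ c < b ∧ p c = true ∧ ∀ i, a ≤ i → i < c → p i = false)) := by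
  intro k
  induction k with
  | zero =>
    intro a c hk
    rw [PySem.List.pyRange_one_eq_nil (by omega)]
    simp only [List.find?_nil]
    constructor
    · intro h; simp at h
    · rintro ⟨h1, h2, -⟩; exfalso; omega
  | succ k ih =>
    intro a c hk
    by_cases h : b ≤ a
    · rw [PySem.List.pyRange_one_eq_nil h]
      simp only [List.find?_nil]
      constructor
      · intro hh; simp at hh
      · rintro ⟨h1, h2, -⟩; exfalso; omega
    · replace h : a < b := by omega
      rw [PySem.List.pyRange_one_cons h]
      cases hpa : p a with
      | true =>
        rw [List.find?_cons_of_pos (h := hpa)]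
        constructor
        · rintro ⟨rfl⟩
          exact ⟨le_refl _, h, hpa, fun i h1 h2 => absurd h2 (by omega)⟩
        · rintro ⟨h1, h2, h3, h4⟩
          by_cases hca : c = a
          · simp [hca]
          · have := h4 a (le_refl _) (by omega)
            rw [hpa] at this; cases this
      | false =>
        rw [List.find?_cons_of_neg (h := by simp [hpa])]
        rw [ih (a + 1) c (by omega)]
        constructor
        · rintro ⟨h1, h2, h3, h4⟩
          refine ⟨by omega, h2, h3, fun i hi1 hi2 => ?_⟩
          rcases eq_or_lt_of_le hi1 with rfl | hlt
          · exact hpa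
          · exact h4 i (by omega) hi2
        · rintro ⟨h1, h2, h3, h4⟩
          by_cases hca : c = a
          · rw [hca] at h3; rw [hpa] at h3; cases h3
          · exact ⟨by omega, h2, h3, fun i hi1 hi2 => h4 i (by omega) hi2⟩

-- inside Python's index range, pyGetD agrees with pyGet?
theorem pvBridge (markers : List Bool) (i : Int) (h1 : -(markers.length : Int) ≤ i) (h2 : i < markers.length) :
    PySem.List.pyGet? markers i = some (PySem.List.pyGetD markers i false) := by
  cases hg : PySem.List.pyGet? markers i with
  | none =>
    rw [PySem.List.pyGet?_eq_none_iff] at hg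
    exact absurd (by simp [PySem.Raise.InRange]; omega) hg
  | some b =>
    have : PySem.List.pyGetD markers i false = b := by
      simp only [PySem.List.pyGetD, PySem.List.pyGet?] at hg ⊢
      rw [hg]; rfl
    rw [this]

-- A's loop after the segment start was found: it scans for the first False and breaks there
theorem pvALoop_found (markers : List Bool) (s0 : Int) : ∀ (k : Nat) (a : Int), ((markers.length : Int) - a).toNat ≤ k →
    pvALoop markers (PySem.List.pyRange a (markers.length : Int) 1) true (some s0)
      = (some s0, (PySem.List.pyRange a (markers.length : Int) 1).find?
          (fun i => !PySem.List.pyGetD markers i false)) := by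
  intro k
  induction k with
  | zero =>
    intro a hk
    rw [PySem.List.pyRange_one_eq_nil (by omega)]
    rfl
  | succ k ih =>
    intro a hk
    by_cases h : (markers.length : Int) ≤ a
    · rw [PySem.List.pyRange_one_eq_nil h]; rfl
    · rw [PySem.List.pyRange_one_cons (by omega)]
      cases hm : PySem.List.pyGetD markers a false with
      | false =>
        rw [List.find?_cons_of_pos (h := by simp [hm])]
        simp [pvALoop, hm]
      | true =>
        rw [List.find?_cons_of_neg (h := by simp [hm])]
        rw [pvALoop]
        norm_num [hm]
        rw [ih (a + 1) (by omega)]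

-- A's loop from the initial state equals the two-phase characterisation
theorem pvALoop_spec (markers : List Bool) : ∀ (k : Nat) (a : Int), ((markers.length : Int) - a).toNat ≤ k →
    pvALoop markers (PySem.List.pyRange a (markers.length : Int) 1) false none
      = (match (PySem.List.pyRange a (markers.length : Int) 1).find?
            (fun i => PySem.List.pyGetD markers i false) with
         | none => (none, none)
         | some s => (some s, (PySem.List.pyRange (s + 1) (markers.length : Int) 1).find?
              (fun i => !PySem.List.pyGetD markers i false))) := by
  intro k
  induction k with
  | zero =>
    intro a hk
    rw [PySem.List.pyRange_one_eq_nil (by omega)]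
    rfl
  | succ k ih =>
    intro a hk
    by_cases h : (markers.length : Int) ≤ a
    · rw [PySem.List.pyRange_one_eq_nil h]; rfl
    · rw [PySem.List.pyRange_one_cons (by omega)]
      cases hm : PySem.List.pyGetD markers a false with
      | true =>
        rw [List.find?_cons_of_pos (h := by simp [hm])]
        rw [pvALoop]
        norm_num [hm]
        rw [pvALoop_found markers a (k := k) (a + 1) (by omega)]
      | false =>
        rw [List.find?_cons_of_neg (h := by simp [hm])]
        rw [pvALoop]
        norm_num [hm]
        exact ih (a + 1) (by omega)

-- B's backward fold: final state characterised by the two first-match searches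
-- (the reverse foldl is the foldr of the forward range, analysed from the front)
theorem pvBfold (markers : List Bool) : ∀ (k : Nat) (a : Int), ((markers.length : Int) - a).toNat ≤ k →
    ((PySem.List.pyRange a (markers.length : Int) 1).reverse).foldl
      (fun (s : Option Int × Option Int × Option Int) i =>
        let m := PySem.List.pyGetD markers i false
        if m = false then (s.1, s.2.1, some i)
        else (some i, some ((s.2.2).getD ((markers.length : Int) - 1)), s.2.2))
      (none, none, none)
    = (match (PySem.List.pyRange a (markers.length : Int) 1).find?
          (fun i => PySem.List.pyGetD markers i false) with
       | none => (none, none,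
          (PySem.List.pyRange a (markers.length : Int) 1).find?
            (fun i => !PySem.List.pyGetD markers i false))
       | some s => (some s,
          some (((PySem.List.pyRange (s + 1) (markers.length : Int) 1).find?
            (fun i => !PySem.List.pyGetD markers i false)).getD ((markers.length : Int) - 1)),
          (PySem.List.pyRange a (markers.length : Int) 1).find?
            (fun i => !PySem.List.pyGetD markers i false))) := by
  intro k
  induction k with
  | zero =>
    intro a hk
    rw [PySem.List.pyRange_one_eq_nil (by omega)]
    rfl
  | succ k ih =>
    intro a hk
    by_cases h : (markers.length : Int) ≤ a
    · rw [PySem.List.pyRange_one_eq_nil h]; rfl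
    · rw [PySem.List.pyRange_one_cons (by omega)]
      rw [List.reverse_cons, List.foldl_append, ih (a + 1) (by omega)]
      simp only [List.foldl_cons, List.foldl_nil]
      cases hm : PySem.List.pyGetD markers a false with
      | false =>
        rw [List.find?_cons_of_neg (h := by simp [hm])]
        rw [List.find?_cons_of_pos (p := fun i => !PySem.List.pyGetD markers i false) (h := by simp [hm])]
        cases hfp : (PySem.List.pyRange (a + 1) (markers.length : Int) 1).find?
            (fun i => PySem.List.pyGetD markers i false) with
        | none => simp
        | some s => simp
      | true =>
        rw [List.find?_cons_of_pos (h := by simp [hm])]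
        rw [List.find?_cons_of_neg (p := fun i => !PySem.List.pyGetD markers i false) (h := by simp [hm])]
        cases hfp : (PySem.List.pyRange (a + 1) (markers.length : Int) 1).find?
            (fun i => PySem.List.pyGetD markers i false) with
        | none => simp
        | some s =>
          -- a is the new first True; its end search starts at a+1, and the old
          -- first-False-from-(a+1) is exactly the third component carried along
          norm_num

-- B's port, rewritten to the two-phase characterisation
theorem pvB_two_phase (markers : List Bool) (start_from : Int) :
    get_next_segments_indices_py_alt markers start_from
      = (match (PySem.List.pyRange start_from (markers.length : Int) 1).find?
            (fun i => PySem.List.pyGetD markers i false) with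
         | none => (none, none)
         | some s => (some s,
            some (((PySem.List.pyRange (s + 1) (markers.length : Int) 1).find?
              (fun i => !PySem.List.pyGetD markers i false)).getD ((markers.length : Int) - 1)))) := by
  unfold get_next_segments_indices_py_alt
  dsimp only
  rw [pvBfold markers (((markers.length : Int) - start_from).toNat) start_from (le_refl _)]
  cases hfp : (PySem.List.pyRange start_from (markers.length : Int) 1).find?
      (fun i => PySem.List.pyGetD markers i false) with
  | none => simp
  | some s => simp

-- Python's wrapped negative indexing, as an index into the dropped suffix
theorem pvGetNeg (markers : List Bool) (t : Int) (h1 : -(markers.length : Int) ≤ t) (h2 : t < 0) :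
    PySem.List.pyGet? markers t = markers[(markers.length + t).toNat]? := by
  rw [show t = -(((-t).toNat : Int)) by omega,
    PySem.List.pyGet?_neg_natCast markers (-t).toNat (by omega) (by omega)]
  congr 1
  omega

theorem pvGetS (markers : List Bool) (start_from : Int)
    (hpre : -(markers.length : Int) ≤ start_from) (i : Nat) (hi : i < (-start_from).toNat) :
    PySem.List.pyGet? markers (start_from + i) =
      (markers.drop (markers.length + start_from).toNat)[i]? := by
  rw [pvGetNeg markers _ (by omega) (by omega), List.getElem?_drop]
  congr 1
  omega

-- from A's break configuration with end index 0, the input lies in D_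
theorem pvD_of_find (markers : List Bool) (start_from s : Int)
    (hpre : -(markers.length : Int) ≤ start_from)
    (hfp : (PySem.List.pyRange start_from (markers.length : Int) 1).find?
        (fun i => PySem.List.pyGetD markers i false) = some s)
    (hq : (PySem.List.pyRange (s + 1) (markers.length : Int) 1).find?
        (fun i => !PySem.List.pyGetD markers i false) = some 0) :
    D_get_next_segments_indices_py markers start_from := by
  obtain ⟨h1, h2, h3, h4⟩ := (pvFind_some_iff _ _ (((markers.length : Int) - start_from).toNat) _ _ (le_refl _)).mp hfp
  obtain ⟨q1, q2, q3, q4⟩ := (pvFind_some_iff _ _ (((markers.length : Int) - (s + 1)).toNat) _ _ (le_refl _)).mp hq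
  have hn : 0 < markers.length := by exact_mod_cast q2
  have hSlen : (markers.drop (markers.length + start_from).toNat).length = (-start_from).toNat := by
    rw [List.length_drop]; omega
  have hget : ∀ i : Nat, i < (-start_from).toNat →
      (markers.drop (markers.length + start_from).toNat)[i]? =
        some (PySem.List.pyGetD markers (start_from + i) false) := by
    intro i hi
    rw [← pvGetS markers start_from hpre i hi, pvBridge markers _ (by omega) (by omega)]
  refine ⟨?_, ?_, ?_⟩
  · have e1 : PySem.List.pyGet? markers 0 = some false := by
      rw [pvBridge markers 0 (by omega) (by exact_mod_cast hn)]
      simp at q3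
      rw [q3]
    rw [PySem.List.pyGet?_zero] at e1
    cases markers with
    | nil => simp at e1
    | cons x xs => simpa using e1
  · rw [List.isChain_iff_getElem]
    intro i hi1
    have hv1 : (markers.drop (markers.length + start_from).toNat)[i]'(by omega)
        = PySem.List.pyGetD markers (start_from + i) false :=
      Option.some.inj ((List.getElem?_eq_getElem (by omega)).symm.trans (hget i (by omega)))
    have hv2 : (markers.drop (markers.length + start_from).toNat)[i + 1]'hi1
        = PySem.List.pyGetD markers (start_from + ((i + 1 : Nat) : Int)) false :=
      Option.some.inj ((List.getElem?_eq_getElem hi1).symm.trans (hget (i + 1) (by omega)))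
    rcases lt_or_ge (start_from + (i : Int)) s with hlt | hge
    · exact le_of_eq_of_le (hv1.trans (h4 (start_from + i) (by omega) hlt)) (Bool.false_le _)
    · have h5 := q4 (start_from + ((i + 1 : Nat) : Int)) (by push_cast; omega) (by push_cast; omega)
      simp only [Bool.not_eq_false'] at h5
      exact le_of_le_of_eq (Bool.le_true _) (hv2.trans h5).symm
  · rw [List.getLast?_eq_getElem?]
    have hKpos : 0 < (-start_from).toNat := by omega
    rw [show (markers.drop (markers.length + start_from).toNat).length - 1
        = (-start_from).toNat - 1 by omega]
    rw [hget ((-start_from).toNat - 1) (by omega)]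
    have hpos : start_from + ((((-start_from).toNat - 1 : Nat)) : Int) = -1 := by omega
    rw [hpos]
    rcases eq_or_lt_of_le (show s ≤ -1 by omega) with he | hlt2
    · rw [← he, h3]
    · have h5 := q4 (-1) (by omega) (by norm_num)
      simp only [Bool.not_eq_false'] at h5
      rw [h5]

-- from D_, A's scan finds a start s and then breaks at end index 0, on a list of length ≥ 2
theorem pvfind_of_D (markers : List Bool) (start_from : Int)
    (hpre : -(markers.length : Int) ≤ start_from)
    (hD : D_get_next_segments_indices_py markers start_from) :
    ∃ s : Int, (PySem.List.pyRange start_from (markers.length : Int) 1).find?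
        (fun i => PySem.List.pyGetD markers i false) = some s ∧
      (PySem.List.pyRange (s + 1) (markers.length : Int) 1).find?
        (fun i => !PySem.List.pyGetD markers i false) = some 0 ∧
      2 ≤ markers.length := by
  obtain ⟨hhead, hchain, hlast⟩ := hD
  have hn : 0 < markers.length := by
    cases markers with
    | nil => simp at hhead
    | cons x xs => simp
  have hm0lt : (markers.length + start_from).toNat < markers.length := by
    by_contra hge
    rw [List.drop_eq_nil_of_le (by omega)] at hlast
    simp at hlast
  have hsf : start_from < 0 := by omega
  have hSlen : (markers.drop (markers.length + start_from).toNat).length = (-start_from).toNat := by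
    rw [List.length_drop]; omega
  have hget : ∀ i : Nat, i < (-start_from).toNat →
      (markers.drop (markers.length + start_from).toNat)[i]? =
        some (PySem.List.pyGetD markers (start_from + i) false) := by
    intro i hi
    rw [← pvGetS markers start_from hpre i hi, pvBridge markers _ (by omega) (by omega)]
  have hP0 : PySem.List.pyGetD markers 0 false = false := by
    have h00 : markers[0]? = some false := by
      cases markers with
      | nil => simp at hhead
      | cons x xs => simpa using hhead
    have e := pvBridge markers 0 (by omega) (by exact_mod_cast hn)
    rw [PySem.List.pyGet?_zero, h00] at e
    exact (Option.some.inj e).symm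
  have htrue_mem : true ∈ markers.drop (markers.length + start_from).toNat :=
    List.mem_of_getLast? hlast
  have hjlt : (markers.drop (markers.length + start_from).toNat).findIdx (fun b => b)
      < (markers.drop (markers.length + start_from).toNat).length :=
    List.findIdx_lt_length_of_exists ⟨true, htrue_mem, rfl⟩
  set j := (markers.drop (markers.length + start_from).toNat).findIdx (fun b => b) with hj
  have hPj : PySem.List.pyGetD markers (start_from + j) false = true := by
    have h5 : (markers.drop (markers.length + start_from).toNat)[j]'hjlt
        = PySem.List.pyGetD markers (start_from + j) false :=
      Option.some.inj ((List.getElem?_eq_getElem hjlt).symm.trans (hget j (by omega)))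
    have h6 := List.findIdx_getElem (w := hjlt)
    exact h5.symm.trans h6
  have hbefP : ∀ i : Nat, i < j → PySem.List.pyGetD markers (start_from + i) false = false := by
    intro i hij
    have h5 : (markers.drop (markers.length + start_from).toNat)[i]'(by omega)
        = PySem.List.pyGetD markers (start_from + i) false :=
      Option.some.inj ((List.getElem?_eq_getElem (by omega)).symm.trans (hget i (by omega)))
    have h6 := List.not_of_lt_findIdx hij
    exact h5.symm.trans h6
  have haftP : ∀ i : Nat, i < (-start_from).toNat → j < i →
      PySem.List.pyGetD markers (start_from + i) false = true := by
    intro i hiK hji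
    have h5 : (markers.drop (markers.length + start_from).toNat)[i]'(by omega)
        = PySem.List.pyGetD markers (start_from + i) false :=
      Option.some.inj ((List.getElem?_eq_getElem (by omega)).symm.trans (hget i hiK))
    have hle := List.pairwise_iff_getElem.mp (List.isChain_iff_pairwise.mp hchain)
      j i hjlt (by omega) hji
    have h7 := List.findIdx_getElem (w := hjlt)
    have h6 : (markers.drop (markers.length + start_from).toNat)[i]'(by omega) = true :=
      le_antisymm (Bool.le_true _) (le_of_eq_of_le h7.symm hle)
    exact h5.symm.trans h6
  have hjK : j < (-start_from).toNat := by omega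
  refine ⟨start_from + (j : Int), ?_, ?_, ?_⟩
  · rw [pvFind_some_iff _ _ (((markers.length : Int) - start_from).toNat) _ _ (le_refl _)]
    refine ⟨by omega, by omega, hPj, fun t ht1 ht2 => ?_⟩
    show PySem.List.pyGetD markers t false = false
    rw [show t = start_from + ((t - start_from).toNat : Int) by omega]
    exact hbefP (t - start_from).toNat (by omega)
  · rw [pvFind_some_iff _ _ (((markers.length : Int) - (start_from + j + 1)).toNat) _ _ (le_refl _)]
    refine ⟨by omega, by exact_mod_cast hn, ?_, fun t ht1 ht2 => ?_⟩
    · show (!PySem.List.pyGetD markers 0 false) = true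
      rw [hP0]
      rfl
    · show (!PySem.List.pyGetD markers t false) = false
      rw [show t = start_from + ((t - start_from).toNat : Int) by omega]
      rw [haftP (t - start_from).toNat (by omega) (by omega)]
      rfl
  · by_contra hlt
    have hl1 : markers.length = 1 := by omega
    have hsf1 : start_from = -1 := by omega
    obtain ⟨b, hb⟩ : ∃ b, markers = [b] := by
      cases markers with
      | nil => simp at hl1
      | cons x xs =>
        cases xs with
        | nil => exact ⟨x, rfl⟩
        | cons y ys => simp at hl1
    rw [hb] at hhead hlast
    rw [hsf1] at hlast
    simp at hhead hlast
    rw [hhead] at hlast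
    cases hlast

-- ===== VERDICT (by name: the statement is the Claim_ definition above) =====
theorem get_next_segments_indices_py_spec : Claim_unchanged_get_next_segments_indices_py := by
  intro markers start_from hdom hpre
  unfold Spec_get_next_segments_indices_py
  intro hD
  rw [pvB_two_phase]
  unfold get_next_segments_indices_py
  dsimp only
  rw [pvALoop_spec markers (((markers.length : Int) - start_from).toNat) start_from (le_refl _)]
  cases hfp : (PySem.List.pyRange start_from (markers.length : Int) 1).find?
      (fun i => PySem.List.pyGetD markers i false) with
  | none => simp
  | some s =>
    cases hq : (PySem.List.pyRange (s + 1) (markers.length : Int) 1).find?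
        (fun i => !PySem.List.pyGetD markers i false) with
    | none => simp [hq]
    | some e =>
      by_cases he : e = 0
      · exact absurd (pvD_of_find markers start_from s hpre hfp (he ▸ hq)) hD
      · simp [hq, he]
theorem get_next_segments_indices_py_changed : Claim_changed_get_next_segments_indices_py := by
  unfold Claim_changed_get_next_segments_indices_py; decide
theorem get_next_segments_indices_py_tight : Claim_exact_get_next_segments_indices_py := by
  intro markers start_from hdom hpre hD
  obtain ⟨s, hfp, hq, hlen2⟩ := pvfind_of_D markers start_from hpre hD
  rw [pvB_two_phase]
  unfold get_next_segments_indices_py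
  dsimp only
  rw [pvALoop_spec markers (((markers.length : Int) - start_from).toNat) start_from (le_refl _)]
  simp [hfp, hq]
  omega
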